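-- pv_equiv track=rewrite | github.com/yekeenfatai/basecamp | base_camp/Bonus_Task2.py | consonantMapper
-- ===== SOURCE A (Python) =====
-- def consonantMapper(word):
--     """consonantReplacement: It accepts lowercase strings and output a string.
--     Each consonant at a position is map to the next consonant"""
--
--     #check if parameter is not a string
--     try:
--         #checks if the parameter is uppercase
--         if word.isupper():
--             return f"{word} is in uppercase, please put in the lower case: {word.lower()}"
--
--         #do this if parameter is lowercase
--         word = word.lower()
--         consonantmaps = {"z": "b","d":"f","h":"j","n":"p","t":"v"}
--         consonantAsci = [98,99,100,102,103,104,106,107,108,109,110,112,113,114,115,116,118,119,120,121,122]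
--         vowels = ["a","e","i","o","u"]
--         newword = ""
--
--         #looping through the parameter
--         for i in word:
--             #converts each letter of the parameter to its ascci code
--             alphabet_asci = ord(i)
--
--             #map and concatenate each letter from the parameter to the newword
--             if i in consonantmaps:
--                 newword += consonantmaps[i]
--             elif alphabet_asci in consonantAsci:
--                 j = alphabet_asci + 1
--                 j = chr(j)
--                 newword += j
--             else:
--                 newword += i
--         #return a string
--         return f"Input: {word}\nOutput: {newword}"
--     except:
--         #return this if the parameter is a string
--         return f"Note! {word} is {type(word)}, please enter a string"
-- ===== SOURCE B (Python) =====
-- def consonantMapper(word):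
--     """consonantReplacement: It accepts lowercase strings and output a string.
--     Each consonant at a position is map to the next consonant"""
--     try:
--         if word.isupper():
--             return f"{word} is in uppercase, please put in the lower case: {word.lower()}"
--         word = word.lower()
--         consonants = "bcdfghjklmnpqrstvwxyz"
--         mapping = {c: consonants[(i + 1) % len(consonants)] for i, c in enumerate(consonants)}
--         newword = "".join(mapping.get(ch, ch) for ch in word)
--         return f"Input: {word}\nOutput: {newword}"
--     except:
--         return f"Note! {word} is {type(word)}, please enter a string"
-- ===== Notes on version B (the rewrite author's own statement) =====
-- stated objective: simpler
-- what changed: Replaces A's two-branch per-character logic (a 5-entry wrap-around dict plus an ord()+1 arithmetic branch guarded by a 21-entry ascii-code list) with a single next-consonant table derived cyclically from the consonant string, so the loop becomes one mapping.get(ch, ch) dict-lookup pass (no per-character list scan).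
import Mathlib
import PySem

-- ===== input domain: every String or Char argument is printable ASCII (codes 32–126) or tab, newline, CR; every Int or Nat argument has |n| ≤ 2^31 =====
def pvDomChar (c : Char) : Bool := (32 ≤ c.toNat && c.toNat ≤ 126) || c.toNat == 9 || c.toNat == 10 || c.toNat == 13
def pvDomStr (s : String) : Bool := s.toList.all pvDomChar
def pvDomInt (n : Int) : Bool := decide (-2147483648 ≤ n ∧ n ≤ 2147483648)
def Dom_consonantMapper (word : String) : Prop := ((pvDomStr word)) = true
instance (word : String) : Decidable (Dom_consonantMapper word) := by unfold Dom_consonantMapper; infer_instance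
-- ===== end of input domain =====

-- B replaces A's ord()+1 arithmetic plus 5-entry wrap dict with one cyclic next-consonant table derived from the consonant string; objective: simpler.


-- word.isupper(): at least one cased character and no lowercase one; exact on ASCII,
-- where the cased characters are exactly the letters (both Pythons call it identically).
def pyStrIsupper (cs : List Char) : Bool :=
  (cs.any (fun c => PySem.Chars.isalpha c)) && !(cs.any (fun c => PySem.Chars.islower c))

-- ===== PORT A =====
def consonantmapsA : PySem.Dict Char Char :=
  PySem.Dict.ofList [('z','b'),('d','f'),('h','j'),('n','p'),('t','v')]
def consonantAsciA : List Int :=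
  [98,99,100,102,103,104,106,107,108,109,110,112,113,114,115,116,118,119,120,121,122]
-- A's loop body: what each branch concatenates for the letter i (ord = toNat, chr = Char.ofNat)
def aChar (i : Char) : Char :=
  if consonantmapsA.contains i then (consonantmapsA.get? i).getD i
  else if ((i.toNat : Int) ∈ consonantAsciA) then Char.ofNat (i.toNat + 1)
  else i
-- (A also defines a list `vowels` it never uses; the try/except can only fire for non-string
-- input, outside the String type, so the except branch is unreachable here.)
def consonantMapper (word : String) : String :=
  if pyStrIsupper word.toList then
    String.ofList (word.toList ++ " is in uppercase, please put in the lower case: ".toList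
               ++ PySem.Chars.lower word.toList)
  else
    let w := PySem.Chars.lower word.toList
    let newword := w.foldl (fun acc i => acc ++ [aChar i]) []
    String.ofList ("Input: ".toList ++ w ++ "\nOutput: ".toList ++ newword)

-- ===== PORT B =====
-- the string consonants = "bcdfghjklmnpqrstvwxyz" as its character list
def consonantsB : List Char :=
  ['b','c','d','f','g','h','j','k','l','m','n','p','q','r','s','t','v','w','x','y','z']
-- the dict comprehension {c: consonants[(i+1) % len(consonants)] for i, c in enumerate(consonants)};
-- the index (i+1) % 21 is always in range, so the .getD default is unreachable
def mappingB : PySem.Dict Char Char :=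
  (PySem.List.enumerate consonantsB 0).foldl
    (fun d ic =>
      d.insert ic.2
        ((PySem.List.pyGet? consonantsB (PySem.Int.mod (ic.1 + 1) (consonantsB.length : Int))).getD ic.2))
    PySem.Dict.empty
def consonantMapper_alt (word : String) : String :=
  if pyStrIsupper word.toList then
    String.ofList (word.toList ++ " is in uppercase, please put in the lower case: ".toList
               ++ PySem.Chars.lower word.toList)
  else
    let w := PySem.Chars.lower word.toList
    -- "".join(mapping.get(ch, ch) for ch in word): a join of one-character strings = the map
    let newword := w.map (fun ch => mappingB.getD ch ch)
    String.ofList ("Input: ".toList ++ w ++ "\nOutput: ".toList ++ newword)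

-- ===== PRECONDITION & SPEC =====
def Spec_consonantMapper (word : String) (out : String) : Prop := out = consonantMapper_alt word
instance (word : String) (out : String) : Decidable (Spec_consonantMapper word out) := by unfold Spec_consonantMapper; infer_instance

-- ===== CLAIM (what is proved, stated in full; the proofs are below) =====
def Claim_equal_consonantMapper : Prop := ∀ (word : String), Dom_consonantMapper word → Spec_consonantMapper word (consonantMapper word)

-- ===== LEMMAS AND PROOFS =====

-- the per-character mappings of A and B agree on every character
theorem perChar (c : Char) : aChar c = mappingB.getD c c := by
  by_cases hm : c ∈ consonantsB
  · fin_cases hm <;> decide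
  · simp only [consonantsB, List.mem_cons, List.not_mem_nil, or_false, not_or] at hm
    obtain ⟨h1,h2,h3,h4,h5,h6,h7,h8,h9,h10,h11,h12,h13,h14,h15,h16,h17,h18,h19,h20,h21⟩ := hm
    have hlit : mappingB = PySem.Dict.mk
        [('b','c'),('c','d'),('d','f'),('f','g'),('g','h'),('h','j'),('j','k'),('k','l'),
         ('l','m'),('m','n'),('n','p'),('p','q'),('q','r'),('r','s'),('s','t'),('t','v'),
         ('v','w'),('w','x'),('x','y'),('y','z'),('z','b')] := by decide
    have hmap : mappingB.getD c c = c := by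
      rw [hlit]
      simp [PySem.Dict.getD, PySem.Dict.get?, PySem.Dict.get?_mk_cons, Ne.symm h1, Ne.symm h2, Ne.symm h3, Ne.symm h4, Ne.symm h5, Ne.symm h6, Ne.symm h7, Ne.symm h8, Ne.symm h9, Ne.symm h10, Ne.symm h11, Ne.symm h12, Ne.symm h13, Ne.symm h14, Ne.symm h15, Ne.symm h16, Ne.symm h17, Ne.symm h18, Ne.symm h19, Ne.symm h20, Ne.symm h21]
    rw [hmap]
    unfold aChar
    have hc : ¬ consonantmapsA.contains c := by
      have hlit2 : consonantmapsA = PySem.Dict.mk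
          [('z','b'),('d','f'),('h','j'),('n','p'),('t','v')] := by decide
      rw [hlit2]
      simp [PySem.Dict.contains_mk, Ne.symm h3, Ne.symm h6, Ne.symm h11, Ne.symm h16, Ne.symm h21]
    have ha : ¬ ((c.toNat : Int) ∈ consonantAsciA) := by
      intro h
      have hofn := Char.ofNat_toNat c
      simp only [consonantAsciA, List.mem_cons, List.not_mem_nil, or_false] at h
      have h' : c.toNat = 98 ∨ c.toNat = 99 ∨ c.toNat = 100 ∨ c.toNat = 102 ∨ c.toNat = 103 ∨ c.toNat = 104 ∨ c.toNat = 106 ∨ c.toNat = 107 ∨ c.toNat = 108 ∨ c.toNat = 109 ∨ c.toNat = 110 ∨ c.toNat = 112 ∨ c.toNat = 113 ∨ c.toNat = 114 ∨ c.toNat = 115 ∨ c.toNat = 116 ∨ c.toNat = 118 ∨ c.toNat = 119 ∨ c.toNat = 120 ∨ c.toNat = 121 ∨ c.toNat = 122 := by exact_mod_cast h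
      rcases h' with h'|h'|h'|h'|h'|h'|h'|h'|h'|h'|h'|h'|h'|h'|h'|h'|h'|h'|h'|h'|h' <;>
        (rw [h'] at hofn; subst hofn;
         first | exact h1 (by decide) | exact h2 (by decide) | exact h3 (by decide) | exact h4 (by decide) | exact h5 (by decide) | exact h6 (by decide) | exact h7 (by decide) | exact h8 (by decide) | exact h9 (by decide) | exact h10 (by decide) | exact h11 (by decide) | exact h12 (by decide) | exact h13 (by decide) | exact h14 (by decide) | exact h15 (by decide) | exact h16 (by decide) | exact h17 (by decide) | exact h18 (by decide) | exact h19 (by decide) | exact h20 (by decide) | exact h21 (by decide))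
    simp [hc, ha]

-- ===== VERDICT (by name: the statement is the Claim_ definition above) =====
theorem consonantMapper_spec : Claim_equal_consonantMapper := by
  intro word _
  unfold Spec_consonantMapper consonantMapper consonantMapper_alt
  by_cases h : pyStrIsupper word.toList
  · simp [h]
  · simp only [h, if_false]
    congr 1
    rw [PySem.List.foldl_append_singleton_eq_map]
    rw [funext perChar]
    simp
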